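-- pv_equiv track=rewrite | github.com/pypi-data/pypi-mirror-392 | packages/v2sim/v2sim-1.3.0rc1.tar.gz/v2sim-1.3.0rc1/v2sim/plotkit/reader.py | _parse_val
-- ===== SOURCE A (Python) =====
-- from typing import Any, List
--
-- def _parse_val(x:str)->List[Any]:
--     v = []
--     v0 = 0
--     for c in x:
--         if c.isdigit():
--             v0 = v0*10 + int(c)
--         else:
--             if v0>0:
--                 v.append(v0)
--                 v0 = 0
--             v.append(ord(c))
--     if v0>0: v.append(v0)
--     return v
-- ===== SOURCE B (Python) =====
-- def _parse_val(x):
--     v = []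
--     i = 0
--     n = len(x)
--     while i < n:
--         if x[i].isdigit():
--             j = i
--             while j < n and x[j].isdigit():
--                 j += 1
--             val = int(x[i:j])
--             if val > 0:
--                 v.append(val)
--             i = j
--         else:
--             v.append(ord(x[i]))
--             i += 1
--     return v
-- ===== Notes on version B (the rewrite author's own statement) =====
-- stated objective: alternative
-- what changed: B scans maximal digit runs with an index-based inner loop and converts each whole run with int() at once (dropping zero-valued runs), instead of A's per-character running accumulator with flush-on-nondigit logic.
import Mathlib
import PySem

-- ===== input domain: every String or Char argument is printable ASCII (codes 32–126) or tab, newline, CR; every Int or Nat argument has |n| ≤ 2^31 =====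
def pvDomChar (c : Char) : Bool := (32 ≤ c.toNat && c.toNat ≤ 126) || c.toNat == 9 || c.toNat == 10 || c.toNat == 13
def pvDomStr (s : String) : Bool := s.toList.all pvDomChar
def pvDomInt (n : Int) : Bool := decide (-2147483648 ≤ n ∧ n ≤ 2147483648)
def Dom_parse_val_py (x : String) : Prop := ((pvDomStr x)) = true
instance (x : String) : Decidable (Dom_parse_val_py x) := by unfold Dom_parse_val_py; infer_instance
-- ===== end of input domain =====

-- B replaces A's per-character running accumulator (flush-on-nondigit) by an
-- index-based scan of maximal digit runs converted with int() at once; same cost, different decomposition.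

-- int(c) for an ASCII digit character c (exact on the digit domain)
def pvDigitVal (c : Char) : Int := (c.toNat : Int) - 48

-- ===== PORT A =====
-- the for-loop of A as structural recursion over the characters, state (v, v0)
def parseValALoop : List Char → List Int → Int → List Int
  | [], v, v0 => if v0 > 0 then v ++ [v0] else v
  | c :: cs, v, v0 =>
    if c.isDigit then
      parseValALoop cs v (v0 * 10 + pvDigitVal c)
    else
      parseValALoop cs ((if v0 > 0 then v ++ [v0] else v) ++ [(c.toNat : Int)])
        (if v0 > 0 then 0 else v0)

def parse_val_py (x : String) : List Int := parseValALoop x.toList [] 0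

-- ===== PORT B =====
-- int(x[i:j]) on an all-digit run (exact there)
def pvRunVal (r : List Char) : Int := r.foldl (fun a c => a * 10 + pvDigitVal c) 0

-- B's outer while-loop: the inner scan j is takeWhile/dropWhile of the maximal digit run
def parseValB : List Char → List Int
  | [] => []
  | c :: cs =>
    if c.isDigit then
      let n := pvRunVal (c :: cs.takeWhile Char.isDigit)
      (if n > 0 then [n] else []) ++ parseValB (cs.dropWhile Char.isDigit)
    else
      (c.toNat : Int) :: parseValB cs
termination_by l => l.length
decreasing_by
  · exact Nat.lt_succ_of_le (List.length_dropWhile_le _ _)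
  · simp

def parse_val_py_alt (x : String) : List Int := parseValB x.toList

-- ===== PRECONDITION & SPEC =====
def Spec_parse_val_py (x : String) (out : List Int) : Prop := out = parse_val_py_alt x
instance (x : String) (out : List Int) : Decidable (Spec_parse_val_py x out) := by unfold Spec_parse_val_py; infer_instance

-- ===== CLAIM (what is proved, stated in full; the proofs are below) =====
def Claim_equal_parse_val_py : Prop := ∀ (x : String), Dom_parse_val_py x → Spec_parse_val_py x (parse_val_py x)

-- ===== LEMMAS AND PROOFS =====

-- accumulator extraction
theorem parseValALoop_append (cs : List Char) : ∀ (v : List Int) (v0 : Int),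
    parseValALoop cs v v0 = v ++ parseValALoop cs [] v0 := by
  induction cs with
  | nil => intro v v0; simp only [parseValALoop]; split_ifs <;> simp
  | cons c cs ih =>
    intro v v0
    simp only [parseValALoop]
    by_cases h : c.isDigit = true
    · rw [if_pos h, if_pos h, ih v]
    · rw [if_neg h, if_neg h,
        ih ((if v0 > 0 then v ++ [v0] else v) ++ [(c.toNat : Int)]),
        ih ((if v0 > 0 then ([] : List Int) ++ [v0] else []) ++ [(c.toNat : Int)])]
      split_ifs <;> simp

-- consuming an all-digit run accumulates the digits into v0
theorem parseValALoop_run (r : List Char) : ∀ (rest : List Char) (v0 : Int),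
    (∀ c ∈ r, c.isDigit) →
    parseValALoop (r ++ rest) [] v0
      = parseValALoop rest [] (r.foldl (fun a c => a * 10 + pvDigitVal c) v0) := by
  induction r with
  | nil => intro rest v0 _; simp
  | cons c r ih =>
    intro rest v0 h
    have hc : c.isDigit := h c (by simp)
    simp only [List.cons_append, parseValALoop, hc, if_pos]
    rw [ih rest _ (fun d hd => h d (by simp [hd]))]
    simp

theorem char_digit_bounds (c : Char) (hc : c.isDigit = true) :
    48 ≤ (c.toNat : Int) ∧ (c.toNat : Int) ≤ 57 := by
  simp only [Char.isDigit, Bool.and_eq_true, decide_eq_true_eq] at hc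
  have b1 := UInt32.le_iff_toNat_le.mp hc.1
  have b2 := UInt32.le_iff_toNat_le.mp hc.2
  have e0 : ('0' : Char).val.toNat = 48 := rfl
  have e9 : ('9' : Char).val.toNat = 57 := rfl
  have hcn : c.toNat = c.val.toNat := rfl
  constructor <;> omega

theorem foldl_digits_nonneg (r : List Char) : ∀ (v0 : Int), 0 ≤ v0 →
    (∀ c ∈ r, c.isDigit) →
    0 ≤ r.foldl (fun a c => a * 10 + pvDigitVal c) v0 := by
  induction r with
  | nil => intro v0 h _; simpa using h
  | cons c r ih =>
    intro v0 h hd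
    have hc := char_digit_bounds c (hd c (by simp))
    refine ih _ ?_ (fun d hdm => hd d (by simp [hdm]))
    simp only [pvDigitVal]
    nlinarith [hc.1]

theorem takeWhile_all_digit (cs : List Char) :
    ∀ c ∈ cs.takeWhile Char.isDigit, c.isDigit := by
  intro c hc
  exact List.mem_takeWhile_imp hc

theorem dropWhile_head_not (cs : List Char) :
    cs.dropWhile Char.isDigit = [] ∨
      ∃ d ds, cs.dropWhile Char.isDigit = d :: ds ∧ d.isDigit = false := by
  induction cs with
  | nil => exact Or.inl rfl
  | cons c cs ih =>
    by_cases h : c.isDigit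
    · simpa [List.dropWhile, h] using ih
    · exact Or.inr ⟨c, cs, by simp [List.dropWhile, h], by simp [h]⟩

-- flushing: with a nondigit (or nothing) ahead, pending v0 ≥ 0 is emitted iff positive
theorem parseValALoop_flush (rest : List Char) (v0 : Int) (h0 : 0 ≤ v0)
    (hr : rest = [] ∨ ∃ d ds, rest = d :: ds ∧ d.isDigit = false) :
    parseValALoop rest [] v0
      = (if v0 > 0 then [v0] else []) ++ parseValALoop rest [] 0 := by
  rcases hr with rfl | ⟨d, ds, rfl, hd⟩
  · simp only [parseValALoop]
    split_ifs with h1 h2 <;> simp_all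
  · have hz : (if v0 > 0 then (0 : Int) else v0) = 0 := by split_ifs <;> omega
    simp only [parseValALoop, hd, Bool.false_eq_true, if_false]
    rw [hz,
      parseValALoop_append ds ((if v0 > 0 then ([] : List Int) ++ [v0] else []) ++ [(d.toNat : Int)]),
      parseValALoop_append ds ((if (0 : Int) > 0 then ([] : List Int) ++ [(0 : Int)] else []) ++ [(d.toNat : Int)])]
    split_ifs with h1 h2 <;> first | omega | simp

theorem parseValA_eq_B : ∀ (n : ℕ) (cs : List Char), cs.length ≤ n →
    parseValALoop cs [] 0 = parseValB cs := by
  intro n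
  induction n with
  | zero =>
    intro cs h
    match cs with
    | [] => simp [parseValALoop, parseValB]
    | c :: cs => simp at h
  | succ n ih =>
    intro cs hlen
    match cs with
    | [] => simp [parseValALoop, parseValB]
    | c :: cs =>
      by_cases h : c.isDigit = true
      · have hall : ∀ d ∈ c :: cs.takeWhile Char.isDigit, d.isDigit := by
          intro d hd
          rcases List.mem_cons.mp hd with rfl | hd'
          · exact h
          · exact takeWhile_all_digit cs d hd'
        have hdecomp : c :: cs
            = (c :: cs.takeWhile Char.isDigit) ++ cs.dropWhile Char.isDigit := by
          simp [List.takeWhile_append_dropWhile]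
        rw [hdecomp, parseValALoop_run _ _ _ hall]
        have hnn : 0 ≤ pvRunVal (c :: cs.takeWhile Char.isDigit) :=
          foldl_digits_nonneg _ 0 le_rfl hall
        rw [show ((c :: cs.takeWhile Char.isDigit).foldl
              (fun a c => a * 10 + pvDigitVal c) 0)
            = pvRunVal (c :: cs.takeWhile Char.isDigit) from rfl]
        rw [parseValALoop_flush _ _ hnn (dropWhile_head_not cs)]
        rw [ih _ (by
          have := List.length_dropWhile_le Char.isDigit cs
          have := Nat.le_of_succ_le_succ hlen
          omega)]
        simp [parseValB, h]
      · have h00 : ¬ ((0 : Int) > 0) := by omega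
        simp only [parseValALoop, h, Bool.false_eq_true, if_false, if_neg h00]
        rw [parseValALoop_append cs (([] : List Int) ++ [(c.toNat : Int)])]
        rw [ih cs (Nat.le_of_succ_le_succ hlen)]
        simp [parseValB, h]

-- ===== VERDICT (by name: the statement is the Claim_ definition above) =====
theorem parse_val_py_spec : Claim_equal_parse_val_py := by
  intro x _
  unfold Spec_parse_val_py parse_val_py parse_val_py_alt
  exact parseValA_eq_B x.toList.length x.toList le_rfl
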